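-- pv_equiv track=rewrite | github.com/Daniil-Vlasenko/SPBUComputationalMethods | Task3.1.py | sort_dic2
-- ===== SOURCE A (Python) =====
-- def sort_dic2(dic, F, n):
--     dic_keys = list(dic.keys())
--     dic_values = list(dic.values())
--     for i in range(len(dic) - 1):
--         for j in range(len(dic) - i - 1):
--             if abs(dic_values[j] - F) > abs(dic_values[j + 1] - F):
--                 dic_keys[j], dic_keys[j + 1] = dic_keys[j + 1], dic_keys[j]
--                 dic_values[j], dic_values[j + 1] = dic_values[j + 1], dic_values[j]
--     new_dic = {}
--     for j in range(n + 1):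
--         new_dic[dic_keys[j]] = dic_values[j]
--     return new_dic
-- ===== SOURCE B (Python) =====
-- import heapq
--
-- def sort_dic2(dic, F, n):
--     best = heapq.nsmallest(n + 1, dic.items(), key=lambda kv: abs(kv[1] - F))
--     return dict(best)
-- ===== Notes on version B (the rewrite author's own statement) =====
-- stated objective: faster
-- what changed: Replaces the hand-written O(n^2) parallel-list bubble sort plus index-loop dict rebuild with a single heapq.nsmallest(n+1) bounded-heap selection over dic.items() and a direct dict() constructor.
-- crash fix: A raises IndexError whenever n >= len(dic) (it indexes the j-th sorted key for j up to n); B returns the dict of all items sorted by |value-F| there. — e.g. on sort_dic2([(1, 5)], 0, 3): A raises IndexError, B returns [(1, 5)]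
import Mathlib
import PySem

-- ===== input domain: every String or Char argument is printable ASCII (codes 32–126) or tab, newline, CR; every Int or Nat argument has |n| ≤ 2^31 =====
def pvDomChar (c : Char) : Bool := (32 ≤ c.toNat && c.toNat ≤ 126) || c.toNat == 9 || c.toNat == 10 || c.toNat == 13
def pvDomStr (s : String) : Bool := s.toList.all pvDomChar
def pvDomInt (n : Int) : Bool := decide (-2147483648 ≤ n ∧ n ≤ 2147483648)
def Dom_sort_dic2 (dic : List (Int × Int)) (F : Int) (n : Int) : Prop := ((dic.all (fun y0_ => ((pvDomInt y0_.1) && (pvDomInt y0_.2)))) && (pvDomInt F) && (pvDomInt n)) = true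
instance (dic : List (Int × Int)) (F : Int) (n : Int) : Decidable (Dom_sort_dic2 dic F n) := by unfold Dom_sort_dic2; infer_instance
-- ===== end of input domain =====

-- B replaces A's hand-written bubble sort over two parallel key/value lists by a single
-- stable selection of the n+1 items smallest by |value-F| (heapq.nsmallest) — measurably faster.


-- ===== PORT A =====
-- one step of the inner loop: compare |values[j]-F| with |values[j+1]-F|, swap both lists on '>'
def pvSwapStep (F : Int) (st : List Int × List Int) (j : Int) : List Int × List Int :=
  if |PySem.List.pyGetD st.2 j 0 - F| > |PySem.List.pyGetD st.2 (j + 1) 0 - F| then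
    ((st.1.set j.toNat (PySem.List.pyGetD st.1 (j + 1) 0)).set (j.toNat + 1) (PySem.List.pyGetD st.1 j 0),
     (st.2.set j.toNat (PySem.List.pyGetD st.2 (j + 1) 0)).set (j.toNat + 1) (PySem.List.pyGetD st.2 j 0))
  else st

def sort_dic2 (dic : List (Int × Int)) (F : Int) (n : Int) : List (Int × Int) :=
  let st :=
    (PySem.List.pyRange 0 ((dic.length : Int) - 1) 1).foldl
      (fun st i => (PySem.List.pyRange 0 ((dic.length : Int) - i - 1) 1).foldl (pvSwapStep F) st)
      (dic.map Prod.fst, dic.map Prod.snd)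
  ((PySem.List.pyRange 0 (n + 1) 1).foldl
      (fun d j => d.insert (PySem.List.pyGetD st.1 j 0) (PySem.List.pyGetD st.2 j 0))
      PySem.Dict.empty).items

-- ===== PORT B =====
-- heapq.nsmallest(n+1, dic.items(), key=…) = sorted(dic.items(), key=…)[:n+1] (documented equivalence)
def sort_dic2_alt (dic : List (Int × Int)) (F : Int) (n : Int) : List (Int × Int) :=
  let best := (PySem.List.sorted dic (fun kv => |kv.2 - F|)).take (n + 1).toNat
  (PySem.Dict.ofList best).items

-- ===== PRECONDITION & SPEC =====
-- Pre_ excludes exactly the inputs where A raises IndexError: n ≥ len(dic) (the rebuild loop indexes dic_keys[j] for j up to n).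
def Pre_sort_dic2 (dic : List (Int × Int)) (F : Int) (n : Int) : Prop := n < (dic.length : Int)
instance (dic : List (Int × Int)) (F : Int) (n : Int) : Decidable (Pre_sort_dic2 dic F n) := by unfold Pre_sort_dic2; infer_instance
def pvWitness_sort_dic2 : (List (Int × Int)) × Int × Int := ([(1, 3), (2, 0), (5, 7)], 2, 1)

-- A raises IndexError whenever n ≥ len(dic); B returns the dict of all items sorted by |value-F| there.
def Raises_sort_dic2 (dic : List (Int × Int)) (F : Int) (n : Int) : Prop := (dic.length : Int) ≤ n
instance (dic : List (Int × Int)) (F : Int) (n : Int) : Decidable (Raises_sort_dic2 dic F n) := by unfold Raises_sort_dic2; infer_instance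
def pvRaiseWitness_sort_dic2 : (List (Int × Int)) × Int × Int := ([(1, 5)], 0, 3)
def pvRaiseWitnessOut_sort_dic2 : List (Int × Int) := [(1, 5)]

def Spec_sort_dic2 (dic : List (Int × Int)) (F : Int) (n : Int) (out : List (Int × Int)) : Prop := out = sort_dic2_alt dic F n
instance (dic : List (Int × Int)) (F : Int) (n : Int) (out : List (Int × Int)) : Decidable (Spec_sort_dic2 dic F n out) := by unfold Spec_sort_dic2; infer_instance

-- ===== CLAIM (what is proved, stated in full; the proofs are below) =====
def Claim_equal_sort_dic2 : Prop := ∀ (dic : List (Int × Int)) (F : Int) (n : Int), Dom_sort_dic2 dic F n → Pre_sort_dic2 dic F n → Spec_sort_dic2 dic F n (sort_dic2 dic F n)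
def Claim_raises_sort_dic2 : Prop := (∀ (dic : List (Int × Int)) (F : Int) (n : Int), Dom_sort_dic2 dic F n → Raises_sort_dic2 dic F n → ¬ Pre_sort_dic2 dic F n) ∧ (Dom_sort_dic2 (pvRaiseWitness_sort_dic2.1) (pvRaiseWitness_sort_dic2.2.1) (pvRaiseWitness_sort_dic2.2.2) ∧ Raises_sort_dic2 (pvRaiseWitness_sort_dic2.1) (pvRaiseWitness_sort_dic2.2.1) (pvRaiseWitness_sort_dic2.2.2) ∧ sort_dic2_alt (pvRaiseWitness_sort_dic2.1) (pvRaiseWitness_sort_dic2.2.1) (pvRaiseWitness_sort_dic2.2.2) = pvRaiseWitnessOut_sort_dic2)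

-- ===== LEMMAS AND PROOFS =====

-- the sort key both programs order by
def pvKey (F : Int) (kv : Int × Int) : Int := |kv.2 - F|

-- structural model of A's inner loop: m adjacent compare-swap steps from the left
def pvPassN (F : Int) : Nat → List (Int × Int) → List (Int × Int)
  | 0, u => u
  | _ + 1, [] => []
  | _ + 1, [x] => [x]
  | m + 1, a :: b :: t =>
      if pvKey F a > pvKey F b then b :: pvPassN F m (a :: t) else a :: pvPassN F m (b :: t)

-- structural model of A's outer loop: passes of widths c, c-1, …, 1
def pvOuter (F : Int) : Nat → List (Int × Int) → List (Int × Int)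
  | 0, u => u
  | c + 1, u => pvOuter F c (pvPassN F (c + 1) u)

theorem pvPassN_split (F : Int) : ∀ (m : Nat) (u : List (Int × Int)),
    pvPassN F m u = pvPassN F m (u.take (m + 1)) ++ u.drop (m + 1) := by
  intro m u
  fun_induction pvPassN F m u with
  | case1 u => simpa [pvPassN, List.drop_one] using (List.take_append_drop 1 u).symm
  | case2 => simp [pvPassN]
  | case3 => simp [pvPassN]
  | case4 m a b t h ih =>
    calc b :: pvPassN F m (a :: t)
        = b :: (pvPassN F m ((a :: t).take (m + 1)) ++ (a :: t).drop (m + 1)) := by rw [← ih]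
      _ = _ := by simp [List.take_succ_cons, List.drop_succ_cons, pvPassN, h]
  | case5 m a b t h ih =>
    calc a :: pvPassN F m (b :: t)
        = a :: (pvPassN F m ((b :: t).take (m + 1)) ++ (b :: t).drop (m + 1)) := by rw [← ih]
      _ = _ := by simp [List.take_succ_cons, List.drop_succ_cons, pvPassN, h]

theorem pvPassN_max (F : Int) : ∀ (m : Nat) (u : List (Int × Int)), u.length = m + 1 →
    ∃ w mx, pvPassN F m u = w ++ [mx] ∧ ∀ y ∈ u, pvKey F y ≤ pvKey F mx := by
  intro m u
  fun_induction pvPassN F m u with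
  | case1 u => intro h; match u, h with
               | [x], _ => exact ⟨[], x, rfl, by simp⟩
  | case2 => simp
  | case3 m x => intro _; exact ⟨[], x, rfl, by simp⟩
  | case4 m a b t h ih =>
    intro hl
    obtain ⟨w, mx, he, hm⟩ := ih (by simp at hl ⊢; omega)
    refine ⟨b :: w, mx, by simp [he], ?_⟩
    intro y hy
    rcases List.mem_cons.1 hy with rfl | hy
    · exact hm y (by simp)
    · rcases List.mem_cons.1 hy with rfl | hy
      · exact le_trans (le_of_lt h) (hm a (by simp))
      · exact hm y (by simp [hy])
  | case5 m a b t h ih =>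
    intro hl
    obtain ⟨w, mx, he, hm⟩ := ih (by simp at hl ⊢; omega)
    refine ⟨a :: w, mx, by simp [he], ?_⟩
    intro y hy
    rcases List.mem_cons.1 hy with rfl | hy
    · exact le_trans (le_of_not_gt h) (hm b (by simp))
    · exact hm y hy
theorem pvInsertBy_comm (F : Int) (a b : Int × Int) (h : pvKey F b < pvKey F a) :
    ∀ (acc : List (Int × Int)),
      PySem.List.insertBy (fun x y => decide (pvKey F x < pvKey F y)) b
          (PySem.List.insertBy (fun x y => decide (pvKey F x < pvKey F y)) a acc)
        = PySem.List.insertBy (fun x y => decide (pvKey F x < pvKey F y)) a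
            (PySem.List.insertBy (fun x y => decide (pvKey F x < pvKey F y)) b acc) := by
  intro acc
  induction acc with
  | nil => simp [PySem.List.insertBy, h, not_lt_of_gt h]
  | cons y ys ih =>
    by_cases hay : pvKey F a < pvKey F y
    · have hby : pvKey F b < pvKey F y := lt_trans h hay
      simp [PySem.List.insertBy, hay, hby, h, not_lt_of_gt h]
    · by_cases hby : pvKey F b < pvKey F y
      · simp [PySem.List.insertBy, hay, hby, not_lt_of_gt h]
      · simp [PySem.List.insertBy, hay, hby, ih]

theorem pvPassN_sorted_inv (F : Int) : ∀ (m : Nat) (u : List (Int × Int)) (acc : List (Int × Int)),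
    (pvPassN F m u).foldl (fun acc x => PySem.List.insertBy (fun a b => decide (pvKey F a < pvKey F b)) x acc) acc
      = u.foldl (fun acc x => PySem.List.insertBy (fun a b => decide (pvKey F a < pvKey F b)) x acc) acc := by
  intro m u
  fun_induction pvPassN F m u with
  | case1 u => intro acc; rfl
  | case2 => intro acc; rfl
  | case3 => intro acc; rfl
  | case4 m a b t h ih =>
    intro acc
    simp only [List.foldl_cons]
    rw [ih]
    simp only [List.foldl_cons]
    rw [pvInsertBy_comm F a b h]
  | case5 m a b t h ih =>
    intro acc
    simp only [List.foldl_cons]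
    rw [ih]
    simp only [List.foldl_cons]

theorem pvOuter_sorted_inv (F : Int) : ∀ (c : Nat) (u : List (Int × Int)),
    PySem.List.sorted (pvOuter F c u) (pvKey F) = PySem.List.sorted u (pvKey F) := by
  intro c
  induction c with
  | zero => intro u; rfl
  | succ c ih =>
    intro u
    show PySem.List.sorted (pvOuter F c (pvPassN F (c+1) u)) (pvKey F) = _
    rw [ih]
    rw [PySem.List.sorted_eq_foldl_insertBy, PySem.List.sorted_eq_foldl_insertBy]
    exact pvPassN_sorted_inv F (c+1) u []

theorem pvPassN_length (F : Int) : ∀ (m : Nat) (u : List (Int × Int)), (pvPassN F m u).length = u.length := by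
  intro m u
  fun_induction pvPassN F m u <;> simp [*]

theorem pvPassN_mem (F : Int) : ∀ (m : Nat) (u : List (Int × Int)) (x : Int × Int), x ∈ pvPassN F m u → x ∈ u := by
  intro m u
  fun_induction pvPassN F m u with
  | case1 => simp
  | case2 => simp
  | case3 => simp
  | case4 m a b t h ih =>
    intro x hx
    rcases List.mem_cons.1 hx with rfl | hx
    · simp
    · rcases List.mem_cons.1 (ih x hx) with rfl | hx <;> simp [hx]
  | case5 m a b t h ih =>
    intro x hx
    rcases List.mem_cons.1 hx with rfl | hx
    · simp
    · rcases List.mem_cons.1 (ih x hx) with rfl | hx <;> simp [hx]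

theorem pvPassN_split' (F : Int) (m : Nat) (u r : List (Int × Int)) (h : u.length = m + 1) :
    pvPassN F m (u ++ r) = pvPassN F m u ++ r := by
  rw [pvPassN_split F m (u ++ r), List.take_left' h, List.drop_left' h]

theorem pvOuter_pairwise_aux (F : Int) : ∀ (c : Nat) (u r : List (Int × Int)),
    u.length = c + 1 → (∀ x ∈ u, ∀ y ∈ r, pvKey F x ≤ pvKey F y) →
    r.Pairwise (fun a b => pvKey F a ≤ pvKey F b) →
    (pvOuter F c (u ++ r)).Pairwise (fun a b => pvKey F a ≤ pvKey F b) := by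
  intro c
  induction c with
  | zero =>
    intro u r hl hdom hr
    match u, hl with
    | [x], _ =>
      show List.Pairwise _ (x :: r)
      exact List.pairwise_cons.2 ⟨fun y hy => hdom x (by simp) y hy, hr⟩
  | succ c ih =>
    intro u r hl hdom hr
    show ((pvOuter F c (pvPassN F (c + 1) (u ++ r)))).Pairwise _
    rw [pvPassN_split' F (c + 1) u r (by omega)]
    obtain ⟨w, mx, he, hm⟩ := pvPassN_max F (c + 1) u (by omega)
    have hwlen : w.length = c + 1 := by
      have := pvPassN_length F (c + 1) u
      rw [he] at this; simp at this; omega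
    have hwmem : ∀ x ∈ w, x ∈ u := fun x hx =>
      pvPassN_mem F (c + 1) u x (he ▸ List.mem_append_left _ hx)
    have hmxmem : mx ∈ u := pvPassN_mem F (c + 1) u mx (he ▸ List.mem_append_right _ (by simp))
    rw [he, List.append_assoc]
    refine ih w (mx :: r) hwlen ?_ ?_
    · intro x hx y hy
      rcases List.mem_cons.1 hy with rfl | hy
      · exact hm x (hwmem x hx)
      · exact hdom x (hwmem x hx) y hy
    · exact List.pairwise_cons.2 ⟨fun y hy => hdom mx hmxmem y hy, hr⟩

theorem pvOuter_eq_sorted (F : Int) (u : List (Int × Int)) :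
    pvOuter F (u.length - 1) u = PySem.List.sorted u (pvKey F) := by
  have hp : (pvOuter F (u.length - 1) u).Pairwise (fun a b => pvKey F a ≤ pvKey F b) := by
    cases u with
    | nil => simp [pvOuter]
    | cons x t =>
      have := pvOuter_pairwise_aux F ((x :: t).length - 1) (x :: t) [] (by simp) (by simp) (by simp)
      simpa using this
  have h1 := pvOuter_sorted_inv F (u.length - 1) u
  rw [PySem.List.sorted_eq_self_of_pairwise _ _ hp] at h1
  exact h1

theorem pvSwapStep_len (F : Int) (st : List Int × List Int) (j : Int) :
    (pvSwapStep F st j).1.length = st.1.length ∧ (pvSwapStep F st j).2.length = st.2.length := by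
  unfold pvSwapStep; split <;> simp

theorem pvFold_len (F : Int) (r : List Int) : ∀ (st : List Int × List Int),
    ((r.foldl (pvSwapStep F) st).1.length = st.1.length ∧ (r.foldl (pvSwapStep F) st).2.length = st.2.length) := by
  induction r with
  | nil => intro st; exact ⟨rfl, rfl⟩
  | cons j r ih =>
    intro st
    simp only [List.foldl_cons]
    obtain ⟨h1, h2⟩ := ih (pvSwapStep F st j)
    obtain ⟨g1, g2⟩ := pvSwapStep_len F st j
    exact ⟨h1.trans g1, h2.trans g2⟩

theorem pvSwapStep_cons (F : Int) (j : Int) (hj : 1 ≤ j) (k v : Int) (kt vt : List Int)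
    (hk : kt.length = vt.length) (hr : j < (vt.length : Int)) :
    pvSwapStep F (k :: kt, v :: vt) j =
      (k :: (pvSwapStep F (kt, vt) (j - 1)).1, v :: (pvSwapStep F (kt, vt) (j - 1)).2) := by
  have hnat : j.toNat = (j - 1).toNat + 1 := by omega
  have h1 : PySem.List.pyGetD (v :: vt) j 0 = PySem.List.pyGetD vt (j - 1) 0 := by
    rw [PySem.List.pyGetD_eq_getElem _ _ (by omega) (by simp; omega),
        PySem.List.pyGetD_eq_getElem _ _ (by omega) (by omega)]
    simp only [hnat, List.getElem_cons_succ]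
  have h1' : PySem.List.pyGetD (k :: kt) j 0 = PySem.List.pyGetD kt (j - 1) 0 := by
    rw [PySem.List.pyGetD_eq_getElem _ _ (by omega) (by simp; omega),
        PySem.List.pyGetD_eq_getElem _ _ (by omega) (by omega)]
    simp only [hnat, List.getElem_cons_succ]
  have h2 : PySem.List.pyGetD (v :: vt) (j + 1) 0 = PySem.List.pyGetD vt (j - 1 + 1) 0 := by
    rw [PySem.List.pyGetD_eq_getElem _ _ (by omega) (by simp; omega),
        PySem.List.pyGetD_eq_getElem _ _ (by omega) (by omega)]
    have : (j + 1).toNat = (j - 1 + 1).toNat + 1 := by omega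
    simp only [this, List.getElem_cons_succ]
  have h2' : PySem.List.pyGetD (k :: kt) (j + 1) 0 = PySem.List.pyGetD kt (j - 1 + 1) 0 := by
    rw [PySem.List.pyGetD_eq_getElem _ _ (by omega) (by simp; omega),
        PySem.List.pyGetD_eq_getElem _ _ (by omega) (by omega)]
    have : (j + 1).toNat = (j - 1 + 1).toNat + 1 := by omega
    simp only [this, List.getElem_cons_succ]
  unfold pvSwapStep
  simp only [h1, h1', h2, h2']
  split
  · simp only [hnat, List.set_cons_succ]
  · rfl

theorem pvShift (F : Int) : ∀ (M : Nat) (k v : Int) (kt vt : List Int), kt.length = vt.length →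
    (M : Int) ≤ (vt.length : Int) →
    (PySem.List.pyRange 1 (M : Int) 1).foldl (pvSwapStep F) (k :: kt, v :: vt)
      = (k :: ((PySem.List.pyRange 0 ((M : Int) - 1) 1).foldl (pvSwapStep F) (kt, vt)).1,
         v :: ((PySem.List.pyRange 0 ((M : Int) - 1) 1).foldl (pvSwapStep F) (kt, vt)).2) := by
  intro M
  induction M with
  | zero =>
    intro k v kt vt _ _
    rw [PySem.List.pyRange_one_eq_nil (by omega), PySem.List.pyRange_one_eq_nil (by omega)]
    simp
  | succ M ih =>
    intro k v kt vt hk hM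
    by_cases hM1 : M = 0
    · subst hM1
      rw [PySem.List.pyRange_one_eq_nil (by omega), PySem.List.pyRange_one_eq_nil (by omega)]
      simp
    · have h1M : (1 : Int) ≤ (M : Int) := by omega
      rw [show ((M + 1 : Nat) : Int) = (M : Int) + 1 by push_cast; ring]
      rw [PySem.List.pyRange_one_succ_right h1M, List.foldl_append]
      rw [ih k v kt vt hk (by omega)]
      simp only [List.foldl_cons, List.foldl_nil]
      have hlen := pvFold_len F (PySem.List.pyRange 0 ((M : Int) - 1) 1) (kt, vt)
      rw [pvSwapStep_cons F (M : Int) h1M _ _ _ _ (by simp at hlen ⊢; omega) (by simp at hlen ⊢; omega)]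
      rw [show (M : Int) + 1 - 1 = (M : Int) by ring]
      conv_rhs => rw [show (M : Int) = ((M : Int) - 1) + 1 by ring]
      rw [PySem.List.pyRange_one_succ_right (by omega), List.foldl_append]
      simp only [List.foldl_cons, List.foldl_nil]

theorem pvInner_eq (F : Int) : ∀ (m : Nat) (u : List (Int × Int)), m < u.length →
    (PySem.List.pyRange 0 (m : Int) 1).foldl (pvSwapStep F) (u.map Prod.fst, u.map Prod.snd)
      = ((pvPassN F m u).map Prod.fst, (pvPassN F m u).map Prod.snd) := by
  intro m
  induction m with
  | zero => intro u _; rw [PySem.List.pyRange_one_eq_nil (by omega)]; rfl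
  | succ m ih =>
    intro u hm
    match u, hm with
    | a :: b :: t, hmm =>
      have hm' : m + 1 < t.length + 2 := by simpa using hmm
      rw [show ((m + 1 : Nat) : Int) = (m : Int) + 1 by push_cast; ring]
      rw [PySem.List.pyRange_one_cons (by omega)]
      simp only [List.foldl_cons]
      have hstep : pvSwapStep F ((a :: b :: t).map Prod.fst, (a :: b :: t).map Prod.snd) 0
          = (if pvKey F a > pvKey F b then ((b :: a :: t).map Prod.fst, (b :: a :: t).map Prod.snd)
             else ((a :: b :: t).map Prod.fst, (a :: b :: t).map Prod.snd)) := by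
        unfold pvSwapStep pvKey
        simp [pysem]
      rw [hstep]
      by_cases hcond : pvKey F a > pvKey F b
      · rw [if_pos hcond]
        have hsh := pvShift F (m + 1) b.1 b.2 ((a :: t).map Prod.fst) ((a :: t).map Prod.snd)
          (by simp) (by simp; omega)
        push_cast at hsh
        simp only [List.map_cons] at hsh ⊢
        rw [show (0:Int) + 1 = 1 by ring, hsh]
        rw [show (m : Int) + 1 - 1 = (m : Int) by ring]
        have := ih (a :: t) (by simp; omega)
        simp only [List.map_cons] at this
        rw [this]
        have : pvPassN F (m + 1) (a :: b :: t) = b :: pvPassN F m (a :: t) := by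
          simp [pvPassN, hcond]
        rw [this]
        simp
      · rw [if_neg hcond]
        have hsh := pvShift F (m + 1) a.1 a.2 ((b :: t).map Prod.fst) ((b :: t).map Prod.snd)
          (by simp) (by simp; omega)
        push_cast at hsh
        simp only [List.map_cons] at hsh ⊢
        rw [show (0:Int) + 1 = 1 by ring, hsh]
        rw [show (m : Int) + 1 - 1 = (m : Int) by ring]
        have := ih (b :: t) (by simp; omega)
        simp only [List.map_cons] at this
        rw [this]
        have : pvPassN F (m + 1) (a :: b :: t) = a :: pvPassN F m (b :: t) := by
          simp [pvPassN, hcond]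
        rw [this]
        simp

theorem pvOuter_eq (F : Int) (L : Nat) : ∀ (c : Nat) (u : List (Int × Int)), u.length = L → (c : Int) < (L : Int) →
    (PySem.List.pyRange ((L : Int) - 1 - (c : Int)) ((L : Int) - 1) 1).foldl
        (fun st i => (PySem.List.pyRange 0 ((L : Int) - i - 1) 1).foldl (pvSwapStep F) st)
        (u.map Prod.fst, u.map Prod.snd)
      = ((pvOuter F c u).map Prod.fst, (pvOuter F c u).map Prod.snd) := by
  intro c
  induction c with
  | zero =>
    intro u hu _
    rw [PySem.List.pyRange_one_eq_nil (by omega)]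
    rfl
  | succ c ih =>
    intro u hu hc
    rw [PySem.List.pyRange_one_cons (by push_cast; omega)]
    simp only [List.foldl_cons]
    have hbound : (L : Int) - ((L : Int) - 1 - ((c : Nat) + 1 : Int)) - 1 = ((c + 1 : Nat) : Int) := by
      push_cast; ring
    rw [show ((L : Int) - 1 - (((c : Nat) : Int) + 1)) = (L : Int) - 1 - ((c + 1 : Nat) : Int) by push_cast; ring] at *
    rw [hbound]
    rw [pvInner_eq F (c + 1) u (by push_cast at hc; omega)]
    have hlen : (pvPassN F (c + 1) u).length = L := by rw [pvPassN_length]; exact hu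
    have := ih (pvPassN F (c + 1) u) hlen (by push_cast at hc ⊢; omega)
    rw [show (L : Int) - 1 - ((c + 1 : Nat) : Int) + 1 = (L : Int) - 1 - ((c : Nat) : Int) by push_cast; ring]
    exact this


-- ===== VERDICT (by name: the statement is the Claim_ definition above) =====
theorem sort_dic2_spec : Claim_equal_sort_dic2 := by
  unfold Claim_equal_sort_dic2
  intro dic F n _ hpre
  unfold Pre_sort_dic2 at hpre
  unfold Spec_sort_dic2
  simp only [sort_dic2, sort_dic2_alt]
  by_cases hn : n + 1 ≤ 0
  · rw [PySem.List.pyRange_one_eq_nil hn, show (n + 1).toNat = 0 by omega]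
    rfl
  · have hL1 : 1 ≤ dic.length := by omega
    have hst := pvOuter_eq F dic.length (dic.length - 1) dic rfl (by omega)
    rw [show ((dic.length : Int) - 1 - ((dic.length - 1 : Nat) : Int)) = 0 by omega] at hst
    rw [hst, pvOuter_eq_sorted F dic]
    rw [show (fun kv : Int × Int => |kv.2 - F|) = pvKey F from rfl]
    set S := PySem.List.sorted dic (pvKey F) with hS
    have hSlen : S.length = dic.length := by rw [hS, PySem.List.length_sorted]
    set T := (n + 1).toNat with hT
    have hTle : T ≤ S.length := by omega
    have htk : (S.take T).length = T := by simp [List.length_take]; omega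
    have hcong : ∀ (acc : PySem.Dict Int Int), ∀ j ∈ PySem.List.pyRange 0 (n + 1) 1,
        acc.insert (PySem.List.pyGetD (S.map Prod.fst) j 0) (PySem.List.pyGetD (S.map Prod.snd) j 0)
          = (fun (d : PySem.Dict Int Int) (kv : Int × Int) => d.insert kv.1 kv.2) acc
              (PySem.List.pyGetD (S.take T) j (0, 0)) := by
      intro acc j hj
      obtain ⟨h0, h1⟩ := PySem.List.mem_pyRange_one.1 hj
      have hjT : j.toNat < T := by omega
      have hjS : j.toNat < S.length := by omega
      rw [PySem.List.pyGetD_eq_getElem (S.map Prod.fst) 0 h0 (by simp; omega),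
          PySem.List.pyGetD_eq_getElem (S.map Prod.snd) 0 h0 (by simp; omega),
          PySem.List.pyGetD_eq_getElem (S.take T) (0, 0) h0 (by simp [htk]; omega)]
      simp
    rw [PySem.List.foldl_congr_mem _ _ _ _ hcong]
    rw [show (n + 1 : Int) = ((S.take T).length : Int) by rw [htk]; omega]
    rw [PySem.List.foldl_pyRange_zero_pyGetD' (S.take T) ((0 : Int), (0 : Int))
        (fun (d : PySem.Dict Int Int) (kv : Int × Int) => d.insert kv.1 kv.2) PySem.Dict.empty]
    rfl

@[simp] theorem sort_dic2_raises : Claim_raises_sort_dic2 := by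
  unfold Claim_raises_sort_dic2
  exact ⟨by intro dic F n _ hr hp; exact absurd hp (by unfold Pre_sort_dic2 Raises_sort_dic2 at *; omega), by decide⟩
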